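-- pv_equiv track=rewrite | github.com/nicolaiflugt/AIOCS | streamlit_app.py | rot_x_encode
-- ===== SOURCE A (Python) =====
-- danish_alphabet = [
--     'A', 'B', 'C', 'D', 'E', 'F', 'G', 'H', 'I', 'J', 'K', 'L', 'M',
--     'N', 'O', 'P', 'Q', 'R', 'S', 'T', 'U', 'V', 'X', 'Y', 'Z', 'Æ', 'Ø', 'Å'
-- ]
--
-- def rot_x_encode(text, offset):
--     result = ''
--     for char in text.upper():
--         if char in danish_alphabet:
--             index = danish_alphabet.index(char)
--             new_index = (index + offset) % len(danish_alphabet)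
--             result += danish_alphabet[new_index]
--         else:
--             result += char
--     return result
-- ===== SOURCE B (Python) =====
-- danish_alphabet = [
--     'A', 'B', 'C', 'D', 'E', 'F', 'G', 'H', 'I', 'J', 'K', 'L', 'M',
--     'N', 'O', 'P', 'Q', 'R', 'S', 'T', 'U', 'V', 'X', 'Y', 'Z', 'Æ', 'Ø', 'Å'
-- ]
--
-- def rot_x_encode(text, offset):
--     # The cipher is a power of the cyclic "successor" permutation of the alphabet:
--     # rotate the whole string by one, (offset mod 28) times.
--     succ = dict(zip(danish_alphabet, danish_alphabet[1:] + danish_alphabet[:1]))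
--     s = text.upper()
--     for _ in range(offset % len(danish_alphabet)):
--         s = ''.join(succ.get(c, c) for c in s)
--     return s
-- ===== Notes on version B (the rewrite author's own statement) =====
-- stated objective: alternative
-- what changed: B computes the cipher as a power of the cyclic group generator: it builds the successor permutation of the alphabet once (each letter to the next, wrapping) and applies it to the whole uppercased string (offset mod 28) times, instead of A's per-character membership test, .index() scan and index+offset arithmetic.
import Mathlib
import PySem

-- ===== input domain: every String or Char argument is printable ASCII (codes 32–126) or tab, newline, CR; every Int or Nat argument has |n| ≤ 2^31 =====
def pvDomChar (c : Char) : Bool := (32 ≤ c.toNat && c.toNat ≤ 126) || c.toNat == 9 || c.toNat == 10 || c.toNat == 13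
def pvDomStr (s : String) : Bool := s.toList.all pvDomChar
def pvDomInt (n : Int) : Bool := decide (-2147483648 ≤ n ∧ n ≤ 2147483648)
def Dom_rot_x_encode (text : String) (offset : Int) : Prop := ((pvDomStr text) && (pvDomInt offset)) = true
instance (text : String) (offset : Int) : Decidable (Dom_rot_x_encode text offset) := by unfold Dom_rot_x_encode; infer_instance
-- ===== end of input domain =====

-- B computes the cipher as the (offset mod 28)-th power of the alphabet's cyclic successor
-- permutation, applied to the whole uppercased string that many times — an alternative algorithm,
-- not faster, replacing A's per-character membership test, .index() scan and index arithmetic.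

-- ===== PORT A =====
-- module-level constant danish_alphabet (shared by A and B, as in the Python module)
def danishAlphabet : List Char :=
  ['A','B','C','D','E','F','G','H','I','J','K','L','M','N','O','P','Q','R','S','T','U','V','X','Y','Z','Æ','Ø','Å']

-- literal port of A: loop over text.upper(), membership test, .index(), (index+offset) % len, append
def rot_x_encode (text : String) (offset : Int) : String :=
  String.ofList <|
    (PySem.Str.upper text).toList.foldl
      (fun result char =>
        if char ∈ danishAlphabet then
          let index : Int := ((PySem.List.index? danishAlphabet char).getD 0 : Nat)
          let newIndex := PySem.Int.mod (index + offset) (PySem.List.len danishAlphabet)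
          result ++ [PySem.List.pyGetD danishAlphabet newIndex char]
        else
          result ++ [char])
      []

-- ===== PORT B =====
-- succ = dict(zip(danish_alphabet, danish_alphabet[1:] + danish_alphabet[:1])); then
-- s = text.upper(); for _ in range(offset % 28): s = ''.join(succ.get(c, c) for c in s)
def rot_x_encode_alt (text : String) (offset : Int) : String :=
  let succ : PySem.Dict Char Char :=
    PySem.Dict.ofList (List.zip danishAlphabet (danishAlphabet.drop 1 ++ danishAlphabet.take 1))
  (PySem.List.pyRange 0 (PySem.Int.mod offset (PySem.List.len danishAlphabet)) 1).foldl
    (fun s _ => String.ofList (s.toList.map (fun c => succ.getD c c)))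
    (PySem.Str.upper text)

-- ===== PRECONDITION & SPEC =====
def Spec_rot_x_encode (text : String) (offset : Int) (out : String) : Prop := out = rot_x_encode_alt text offset
instance (text : String) (offset : Int) (out : String) : Decidable (Spec_rot_x_encode text offset out) := by unfold Spec_rot_x_encode; infer_instance

-- ===== CLAIM (what is proved, stated in full; the proofs are below) =====
def Claim_equal_rot_x_encode : Prop := ∀ (text : String) (offset : Int), Dom_rot_x_encode text offset → Spec_rot_x_encode text offset (rot_x_encode text offset)

-- ===== LEMMAS AND PROOFS =====

-- B's successor table and per-character step (names for the `let` in the port)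
def succTable : PySem.Dict Char Char :=
  PySem.Dict.ofList (List.zip danishAlphabet (danishAlphabet.drop 1 ++ danishAlphabet.take 1))

def succChar (c : Char) : Char := succTable.getD c c

-- A's loop body as a per-character function
def rotCharA (offset : Int) (c : Char) : Char :=
  if c ∈ danishAlphabet then
    PySem.List.pyGetD danishAlphabet
      (PySem.Int.mod ((((PySem.List.index? danishAlphabet c).getD 0 : Nat) : Int) + offset)
        (PySem.List.len danishAlphabet)) c
  else c

-- A's per-character function with the offset already reduced modulo 28
def rotCharK (k : Nat) (c : Char) : Char :=
  if c ∈ danishAlphabet then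
    danishAlphabet.getD (((PySem.List.index? danishAlphabet c).getD 0 + k) % 28) c
  else c

-- a character outside the alphabet is not a key of the successor table
lemma succChar_not_mem (c : Char) (h : ¬ c ∈ danishAlphabet) : succChar c = c := by
  simp [danishAlphabet] at h
  obtain ⟨h1,h2,h3,h4,h5,h6,h7,h8,h9,h10,h11,h12,h13,h14,h15,h16,h17,h18,h19,h20,h21,h22,h23,h24,
    h25,h26,h27,h28⟩ := h
  simp [succChar, succTable, danishAlphabet, PySem.Dict.ofList, PySem.Dict.update,
    PySem.Dict.getD_insert, PySem.Dict.getD_empty,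
    h1,h2,h3,h4,h5,h6,h7,h8,h9,h10,h11,h12,h13,h14,h15,h16,h17,h18,h19,h20,h21,h22,h23,h24,
    h25,h26,h27,h28]

-- the finite check: on the 28 letters, k-fold successor = shift by k (k < 28)
set_option maxHeartbeats 1000000 in
lemma succ_iter_shift : ((List.range 28).all (fun k => danishAlphabet.all
    (fun c => rotCharK k c == succChar^[k] c))) = true := by decide

lemma rotCharK_eq_iter (k : Nat) (hk : k < 28) (c : Char) : rotCharK k c = succChar^[k] c := by
  by_cases h : c ∈ danishAlphabet
  · have := succ_iter_shift
    simp only [List.all_eq_true, beq_iff_eq, List.mem_range] at this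
    exact this k hk c h
  · rw [Function.iterate_fixed (succChar_not_mem c h) k]
    simp [rotCharK, h]

-- A's per-character step only depends on offset modulo 28
lemma rotCharA_eq_rotCharK (offset : Int) (c : Char) :
    rotCharA offset c = rotCharK (PySem.Int.mod offset 28).toNat c := by
  unfold rotCharA rotCharK
  by_cases h : c ∈ danishAlphabet
  · simp only [h, if_true]
    have hlen : PySem.List.len danishAlphabet = 28 := by decide
    rw [hlen, PySem.Int.mod_eq_emod_of_pos (by norm_num : (0:Int) < 28),
      PySem.Int.mod_eq_emod_of_pos (by norm_num : (0:Int) < 28)]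
    have harg : ((((PySem.List.index? danishAlphabet c).getD 0 : Nat) : Int) + offset) % 28
        = ((((PySem.List.index? danishAlphabet c).getD 0 + (offset % 28).toNat) % 28 : Nat) : Int) := by
      push_cast
      omega
    rw [harg, PySem.List.pyGetD_natCast]
  · simp [h]

-- 'for _ in range(...): s = g(s)' is iteration of g, length-of-the-range times
lemma foldl_const_iterate {α β : Type} (g : α → α) :
    ∀ (l : List β) (init : α), l.foldl (fun s _ => g s) init = g^[l.length] init := by
  intro l
  induction l with
  | nil => intro init; rfl
  | cons x t ih => intro init; simp [List.foldl_cons, ih, Function.iterate_succ_apply]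

-- iterating the whole-string pass = mapping the iterated per-character step
lemma iterate_map_pass (k : Nat) (s : String) :
    (fun s => String.ofList (s.toList.map succChar))^[k] s
      = String.ofList (s.toList.map (succChar^[k])) := by
  induction k generalizing s with
  | zero => simp
  | succ k ih =>
      rw [Function.iterate_succ_apply, ih]
      simp [List.map_map, Function.iterate_succ]

-- ===== VERDICT (by name: the statement is the Claim_ definition above) =====
theorem rot_x_encode_spec : Claim_equal_rot_x_encode := by
  intro text offset _
  unfold Spec_rot_x_encode rot_x_encode rot_x_encode_alt
  have hstep :
      (fun (result : List Char) (char : Char) =>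
          if char ∈ danishAlphabet then
            let index : Int := ((PySem.List.index? danishAlphabet char).getD 0 : Nat)
            let newIndex := PySem.Int.mod (index + offset) (PySem.List.len danishAlphabet)
            result ++ [PySem.List.pyGetD danishAlphabet newIndex char]
          else
            result ++ [char]) =
        fun result char => result ++ [rotCharA offset char] := by
    funext result char
    simp only [rotCharA]
    split_ifs <;> rfl
  rw [hstep, PySem.List.foldl_append_singleton_eq_map, List.nil_append]
  show _ = (PySem.List.pyRange 0 (PySem.Int.mod offset (PySem.List.len danishAlphabet)) 1).foldl
      (fun s _ => String.ofList (s.toList.map succChar)) (PySem.Str.upper text)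
  rw [foldl_const_iterate, PySem.List.length_pyRange_one, iterate_map_pass]
  have hlen : PySem.List.len danishAlphabet = 28 := by decide
  rw [hlen]
  have hk : (PySem.Int.mod offset 28 - 0).toNat = (PySem.Int.mod offset 28).toNat := by omega
  rw [hk]
  congr 1
  apply List.map_congr_left
  intro c _
  rw [rotCharA_eq_rotCharK offset c]
  exact rotCharK_eq_iter _ (by
    have := PySem.Int.mod_lt offset (b := 28) (by norm_num)
    have := PySem.Int.mod_nonneg offset (b := 28) (by norm_num)
    omega) c
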